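-- pv_equiv track=rewrite | github.com/chalfontchubby/mecanum | boneyard/nema_pwm.py | calc_motor_speeds
-- ===== SOURCE A (Python) =====
-- MOTOR_SPEED = 64000
--
-- def calc_motor_speeds(velocities) :
--     setup = {
--         "FORE": [
--              1, -1,
--              1, -1
--         ],
--         "LEFT": [
--              1,  1,
--             -1, -1
--         ],
--         "CLOCK": [
--              1,  1,
--              1,  1
--         ]
--     }
--     # Speed of each of the 4 motors is the sum of the velocity in that direction * it's motor direction
--     # returns a list of 4 motor speeds
--     return [MOTOR_SPEED * sum(setup[dir][i] * velocities[dir] for dir in velocities.keys() ) for i in range (4)]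
-- ===== SOURCE B (Python) =====
-- MOTOR_SPEED = 64000
--
-- def calc_motor_speeds(velocities):
--     # Aggregate velocities per direction, then expand the fixed mixing matrix
--     # as an algebraic closed form per motor.
--     totals = {"FORE": 0, "LEFT": 0, "CLOCK": 0}
--     for d in velocities.keys():
--         totals[d] += velocities[d]
--     f, l, c = totals["FORE"], totals["LEFT"], totals["CLOCK"]
--     return [MOTOR_SPEED * (f + l + c),
--             MOTOR_SPEED * (-f + l + c),
--             MOTOR_SPEED * (f - l + c),
--             MOTOR_SPEED * (-f - l + c)]
-- ===== Notes on version B (the rewrite author's own statement) =====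
-- stated objective: alternative
-- what changed: B first aggregates the velocities into three per-direction totals (FORE/LEFT/CLOCK) in one pass and then emits the four motor speeds as an algebraic closed form of those totals, instead of A's four per-motor matrix-row dot products over the velocities dict.
import Mathlib
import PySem

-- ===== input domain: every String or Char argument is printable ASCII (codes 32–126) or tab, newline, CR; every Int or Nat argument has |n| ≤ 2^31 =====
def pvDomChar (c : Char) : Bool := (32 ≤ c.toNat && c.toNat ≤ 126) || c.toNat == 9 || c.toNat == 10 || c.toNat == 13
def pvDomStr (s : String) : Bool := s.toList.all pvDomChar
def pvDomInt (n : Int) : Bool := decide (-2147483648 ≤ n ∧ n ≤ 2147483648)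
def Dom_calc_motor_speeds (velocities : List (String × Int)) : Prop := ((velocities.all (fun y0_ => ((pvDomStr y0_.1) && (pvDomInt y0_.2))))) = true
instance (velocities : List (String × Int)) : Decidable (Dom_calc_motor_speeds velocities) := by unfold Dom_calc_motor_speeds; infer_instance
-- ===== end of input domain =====

-- B aggregates velocities into three per-direction totals, then emits the four motor
-- speeds as a closed form of those totals (objective: alternative algorithm).

-- ===== PORT A =====
-- the 'setup' dict A builds
def msSetup : PySem.Dict String (List Int) :=
  PySem.Dict.ofList [("FORE", [1, -1, 1, -1]), ("LEFT", [1, 1, -1, -1]), ("CLOCK", [1, 1, 1, 1])]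

-- A: [MOTOR_SPEED * sum(setup[dir][i] * velocities[dir] for dir in velocities.keys()) for i in range(4)]
-- setup[dir] / [i] are total via getD; Pre_ excludes the KeyError inputs, where nothing is claimed.
def calc_motor_speeds (velocities : List (String × Int)) : List Int :=
  let d := PySem.Dict.ofList velocities
  (PySem.List.pyRange 0 4 1).map (fun i =>
    64000 * d.keys.foldl (fun acc dir =>
      acc + ((msSetup.getD dir []).getD i.toNat 0) * (d.getD dir 0)) 0)

-- ===== PORT B =====
-- B: totals = {"FORE":0,"LEFT":0,"CLOCK":0}; for d in velocities: totals[d] += velocities[d];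
--    then four closed-form combinations of the three totals.
-- 'totals[d] += v' raises KeyError for an unknown d in Python; ported with getD 0 + insert,
-- exact on Pre_ (where every key is a known direction, so the default is never taken).
def calc_motor_speeds_alt (velocities : List (String × Int)) : List Int :=
  let d := PySem.Dict.ofList velocities
  let totals := d.keys.foldl
    (fun t dir => t.insert dir (t.getD dir 0 + d.getD dir 0))
    (PySem.Dict.ofList [("FORE", (0 : Int)), ("LEFT", 0), ("CLOCK", 0)])
  let f := totals.getD "FORE" 0
  let l := totals.getD "LEFT" 0
  let c := totals.getD "CLOCK" 0
  [64000 * (f + l + c), 64000 * (-f + l + c), 64000 * (f - l + c), 64000 * (-f - l + c)]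

-- ===== PRECONDITION & SPEC =====
-- Pre_ excludes exactly the inputs on which Python A raises KeyError (a key other than FORE/LEFT/CLOCK).
def Pre_calc_motor_speeds (velocities : List (String × Int)) : Prop :=
  ∀ p ∈ velocities, p.1 = "FORE" ∨ p.1 = "LEFT" ∨ p.1 = "CLOCK"
instance (velocities : List (String × Int)) : Decidable (Pre_calc_motor_speeds velocities) := by
  unfold Pre_calc_motor_speeds; infer_instance
def pvWitness_calc_motor_speeds : (List (String × Int)) := [("FORE", 3), ("LEFT", -2)]
def Spec_calc_motor_speeds (velocities : List (String × Int)) (out : List Int) : Prop := out = calc_motor_speeds_alt velocities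
instance (velocities : List (String × Int)) (out : List Int) : Decidable (Spec_calc_motor_speeds velocities out) := by unfold Spec_calc_motor_speeds; infer_instance

-- ===== CLAIM =====
def Claim_equal_calc_motor_speeds : Prop := ∀ (velocities : List (String × Int)), Dom_calc_motor_speeds velocities → Pre_calc_motor_speeds velocities → Spec_calc_motor_speeds velocities (calc_motor_speeds velocities)

-- ===== LEMMAS AND PROOFS =====

-- A's per-index sum over a key list
def msSum (ks : List String) (d : PySem.Dict String Int) (i : Nat) : Int :=
  ks.foldl (fun acc dir => acc + ((msSetup.getD dir []).getD i 0) * (d.getD dir 0)) 0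

-- B's per-direction total over a key list
def msTot (ks : List String) (d : PySem.Dict String Int) (key : String) : Int :=
  ks.foldl (fun acc k => acc + (if k = key then d.getD k 0 else 0)) 0

theorem msSum_shift (ks : List String) (d : PySem.Dict String Int) (i : Nat) (c : Int) :
    ks.foldl (fun acc dir => acc + ((msSetup.getD dir []).getD i 0) * (d.getD dir 0)) c
      = c + msSum ks d i := by
  induction ks generalizing c with
  | nil => simp [msSum]
  | cons x xs ih =>
      simp only [msSum, List.foldl_cons]
      conv_lhs => rw [ih]
      conv_rhs => rw [ih]
      ring

theorem msTot_shift (ks : List String) (d : PySem.Dict String Int) (key : String) (c : Int) :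
    ks.foldl (fun acc k => acc + (if k = key then d.getD k 0 else 0)) c
      = c + msTot ks d key := by
  induction ks generalizing c with
  | nil => simp [msTot]
  | cons x xs ih =>
      simp only [msTot, List.foldl_cons]
      conv_lhs => rw [ih]
      conv_rhs => rw [ih]
      ring

theorem msTot_cons (x : String) (xs : List String) (d : PySem.Dict String Int) (key : String) :
    msTot (x :: xs) d key = (if x = key then d.getD x 0 else 0) + msTot xs d key := by
  simp only [msTot, List.foldl_cons]
  rw [msTot_shift]
  simp [msTot]

-- B's totals fold: final value of each key = initial value + the per-direction total
theorem msFold_getD (ks : List String) (d t0 : PySem.Dict String Int) (key : String) :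
    (ks.foldl (fun t dir => t.insert dir (t.getD dir 0 + d.getD dir 0)) t0).getD key 0
      = t0.getD key 0 + msTot ks d key := by
  induction ks generalizing t0 with
  | nil => simp [msTot]
  | cons x xs ih =>
      rw [List.foldl_cons, ih, msTot_cons, PySem.Dict.getD_insert]
      by_cases h : key = x
      · subst h; simp
        ring
      · have h' : ¬ x = key := fun e => h e.symm
        simp [h, h']

-- A's dot product decomposes into the three per-direction totals with the matrix-row coefficients
theorem msSum_decomp (ks : List String) (d : PySem.Dict String Int) (i : Nat) :
    msSum ks d i
      = (([1, -1, 1, -1] : List Int).getD i 0) * msTot ks d "FORE"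
      + (([1, 1, -1, -1] : List Int).getD i 0) * msTot ks d "LEFT"
      + (([1, 1, 1, 1] : List Int).getD i 0) * msTot ks d "CLOCK" := by
  induction ks with
  | nil => simp [msSum, msTot]
  | cons x xs ih =>
      have hcons : msSum (x :: xs) d i
          = ((msSetup.getD x []).getD i 0) * (d.getD x 0) + msSum xs d i := by
        simp only [msSum, List.foldl_cons]
        rw [msSum_shift]
        simp [msSum]
      rw [hcons, ih, msTot_cons, msTot_cons, msTot_cons]
      by_cases hF : x = "FORE"
      · subst hF
        have : msSetup.getD "FORE" [] = [1, -1, 1, -1] := by decide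
        rw [this]; simp; ring
      · by_cases hL : x = "LEFT"
        · subst hL
          have : msSetup.getD "LEFT" [] = [1, 1, -1, -1] := by decide
          rw [this]; simp; ring
        · by_cases hC : x = "CLOCK"
          · subst hC
            have : msSetup.getD "CLOCK" [] = [1, 1, 1, 1] := by decide
            rw [this]; simp; ring
          · have hF' : ("FORE" == x) = false := by
              simp only [beq_eq_false_iff_ne]; exact fun e => hF e.symm
            have hL' : ("LEFT" == x) = false := by
              simp only [beq_eq_false_iff_ne]; exact fun e => hL e.symm
            have hC' : ("CLOCK" == x) = false := by
              simp only [beq_eq_false_iff_ne]; exact fun e => hC e.symm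
            have hget : msSetup.get? x = none := by
              have e : msSetup.items = [("FORE", [1, -1, 1, -1]), ("LEFT", [1, 1, -1, -1]),
                  ("CLOCK", [1, 1, 1, 1])] := by decide
              simp [PySem.Dict.get?, e, hF', hL', hC']
            have hnone : msSetup.getD x [] = [] := by
              simp [PySem.Dict.getD, hget]
            rw [hnone]
            simp only [List.getD_nil, zero_mul, zero_add]
            simp [hF, hL, hC]

-- ===== VERDICT =====
theorem calc_motor_speeds_spec : Claim_equal_calc_motor_speeds := by
  intro velocities _ _
  unfold Spec_calc_motor_speeds
  simp only [calc_motor_speeds, calc_motor_speeds_alt]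
  have hr : (PySem.List.pyRange 0 4 1) = [0, 1, 2, 3] := by decide
  rw [hr]
  simp only [List.map]
  rw [msSum_shift, msSum_shift, msSum_shift, msSum_shift] <;> try rfl
  rw [msFold_getD, msFold_getD, msFold_getD]
  have h0 : (PySem.Dict.ofList [("FORE", (0 : Int)), ("LEFT", 0), ("CLOCK", 0)]).getD "FORE" 0 = 0 := by decide
  have h1 : (PySem.Dict.ofList [("FORE", (0 : Int)), ("LEFT", 0), ("CLOCK", 0)]).getD "LEFT" 0 = 0 := by decide
  have h2 : (PySem.Dict.ofList [("FORE", (0 : Int)), ("LEFT", 0), ("CLOCK", 0)]).getD "CLOCK" 0 = 0 := by decide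
  rw [h0, h1, h2]
  rw [msSum_decomp, msSum_decomp, msSum_decomp, msSum_decomp]
  have ht2 : Int.toNat 2 = 2 := rfl
  have ht3 : Int.toNat 3 = 3 := rfl
  simp only [ht2, ht3, Int.toNat_zero, Int.toNat_one]
  norm_num [List.getD]
  and_intros <;> ring
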